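-- pv_equiv track=rewrite | github.com/CASY82/CHH_StudyRoom | Algo/Greedy/Baek_13417.py | solve_one
-- ===== SOURCE A (Python) =====
-- from collections import deque
--
-- def prefer_front(dq: deque, x: str) -> bool:
--     if not dq:
--         return True
--
--     n = len(dq)
--     total = n + 1
--
--     def getA(k: int) -> str:
--         return x if k == 0 else dq[k - 1]
--
--     def getB(k: int) -> str:
--         return dq[k] if k < n else x
--
--     for k in range(total):
--         a = getA(k)
--         b = getB(k)
--         if a != b:
--             return a < b
--
--     return True
--
-- def solve_one(cards):
--     dq = deque()
--     for x in cards: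
--         if prefer_front(dq, x):
--             dq.appendleft(x)
--         else:
--             dq.append(x)
--     return ''.join(dq)
-- ===== SOURCE B (Python) =====
-- def solve_one(cards):
--     # O(1) per card: track front value c, leading-run length, and first element after the run
--     left = []   # front part, reversed
--     right = []  # back part
--     c = ""      # value of the leading run (meaningful when run > 0)
--     run = 0     # length of the leading run (0 iff deque empty)
--     d = None    # first element after the leading run, or None
--     for x in cards:
--         if run == 0:
--             front = True
--         elif x != c:
--             front = x < c
--         else:
--             front = d is None or x < d
--         if front:
--             left.append(x)
--             if x == c:
--                 run += 1
--             else: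
--                 if run > 0:
--                     d = c
--                 c = x
--                 run = 1
--         else:
--             right.append(x)
--             if d is None:
--                 d = x
--     left.reverse()
--     return ''.join(left + right)
-- ===== Notes on version B (the rewrite author's own statement) =====
-- stated objective: faster
-- what changed: A decides each front/back insertion by an O(n) positional comparison of x+dq vs dq+x over the whole deque; B decides in O(1) per card by maintaining the leading run (front value, run length, first element after the run), making the whole pass linear.
import Mathlib
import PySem

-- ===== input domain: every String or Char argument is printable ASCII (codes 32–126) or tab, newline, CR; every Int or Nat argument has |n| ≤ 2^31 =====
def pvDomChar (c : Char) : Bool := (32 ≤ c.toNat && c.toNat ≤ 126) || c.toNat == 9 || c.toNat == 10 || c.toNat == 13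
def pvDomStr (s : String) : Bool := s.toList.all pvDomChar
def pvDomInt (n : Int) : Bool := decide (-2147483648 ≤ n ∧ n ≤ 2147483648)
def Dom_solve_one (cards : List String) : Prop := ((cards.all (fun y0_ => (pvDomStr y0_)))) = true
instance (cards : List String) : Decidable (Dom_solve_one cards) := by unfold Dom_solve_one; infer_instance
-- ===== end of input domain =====

-- B replaces A's O(n) whole-deque comparison per card by an O(1) leading-run test; objective: faster (asymptotic).

-- ===== PORT A =====
-- the `for k in range(total)` loop of prefer_front, with its early return;
-- dq[k-1] / dq[k] are always in range here, so getD is exact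
def pfGo (dq : List String) (x : String) (n : Nat) : List Nat → Bool
  | [] => true
  | k :: ks =>
    let a := if k = 0 then x else dq.getD (k - 1) ""
    let b := if k < n then dq.getD k "" else x
    if a ≠ b then decide (a < b) else pfGo dq x n ks

def prefer_front (dq : List String) (x : String) : Bool :=
  if dq = [] then true
  else pfGo dq x dq.length (List.range (dq.length + 1))

def solve_one (cards : List String) : String :=
  String.join (cards.foldl
    (fun dq x => if prefer_front dq x then x :: dq else dq ++ [x]) [])

-- ===== PORT B =====
-- state = (left (reversed front part), right, c (leading-run value), run (its length, 0 iff empty), d (first element after the run))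
def solveStep (st : List String × List String × String × Nat × Option String)
    (x : String) : List String × List String × String × Nat × Option String :=
  match st with
  | (left, right, c, run, d) =>
    let front : Bool :=
      if run = 0 then true
      else if x ≠ c then decide (x < c)
      else d.elim true (fun dv => decide (x < dv))
    if front then
      if x = c then (left ++ [x], right, c, run + 1, d)
      else (left ++ [x], right, x, 1, if run > 0 then some c else d)
    else
      (left, right ++ [x], c, run, if d = none then some x else d)

def solve_one_alt (cards : List String) : String :=
  match cards.foldl solveStep ([], [], "", 0, none) with
  | (left, right, _, _, _) => String.join (left.reverse ++ right)

-- ===== PRECONDITION & SPEC =====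
def Spec_solve_one (cards : List String) (out : String) : Prop := out = solve_one_alt cards
instance (cards : List String) (out : String) : Decidable (Spec_solve_one cards out) := by unfold Spec_solve_one; infer_instance

-- ===== CLAIM (what is proved, stated in full; the proofs are below) =====
def Claim_equal_solve_one : Prop := ∀ (cards : List String), Dom_solve_one cards → Spec_solve_one cards (solve_one cards)

-- ===== LEMMAS AND PROOFS =====

-- lexicographic comparison with ties → true; prefer_front dq x computes lexLe (x::dq) (dq++[x])
def lexLe : List String → List String → Bool
  | [], _ => true
  | _ :: _, [] => true
  | a :: as, b :: bs => if a ≠ b then decide (a < b) else lexLe as bs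

theorem pfGo_eq_lexLe (x : String) : ∀ (m k : Nat) (dq : List String),
    k + m = dq.length + 1 →
    pfGo dq x dq.length (List.range' k m) =
      lexLe ((x :: dq).drop k) ((dq ++ [x]).drop k) := by
  intro m
  induction m with
  | zero =>
    intro k dq hk
    simp at hk
    subst hk
    simp [pfGo, lexLe]
  | succ m ih =>
    intro k dq hk
    have hkn : k < dq.length + 1 := by omega
    have hk1 : k < (x :: dq).length := by simp; omega
    have hk2 : k < (dq ++ [x]).length := by simp; omega
    rw [List.range'_succ]
    simp only [pfGo]
    have ha : (if k = 0 then x else dq.getD (k - 1) "") = (x :: dq)[k] := by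
      by_cases h0 : k = 0
      · subst h0; simp
      · obtain ⟨j, rfl⟩ : ∃ j, k = j + 1 := ⟨k - 1, by omega⟩
        have hj : j < dq.length := by omega
        simp [List.getElem?_eq_getElem hj]
    have hb : (if k < dq.length then dq.getD k "" else x) = (dq ++ [x])[k] := by
      by_cases hlt : k < dq.length
      · rw [if_pos hlt, List.getD_eq_getElem dq "" hlt, List.getElem_append_left hlt]
      · have hke : k = dq.length := by omega
        subst hke
        simp
    rw [ha, hb, List.drop_eq_getElem_cons hk1, List.drop_eq_getElem_cons hk2]
    simp only [lexLe]
    by_cases hab : (x :: dq)[k] ≠ (dq ++ [x])[k]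
    · rw [if_pos hab, if_pos hab]
    · rw [if_neg hab, if_neg hab]
      exact ih (k + 1) dq (by omega)

theorem prefer_front_eq_lexLe (dq : List String) (x : String) :
    prefer_front dq x = lexLe (x :: dq) (dq ++ [x]) := by
  unfold prefer_front
  by_cases hdq : dq = []
  · subst hdq
    simp [lexLe]
  · rw [if_neg hdq, List.range_eq_range']
    simpa using pfGo_eq_lexLe x (dq.length + 1) 0 dq (by omega)

theorem lexLe_rotate : ∀ (dq : List String) (x : String),
    lexLe (x :: dq) (dq ++ [x]) =
      (match dq.find? (fun y => decide (y ≠ x)) with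
       | none => true
       | some y => decide (x < y)) := by
  intro dq
  induction dq with
  | nil => intro x; simp [lexLe]
  | cons y rest ih =>
    intro x
    simp only [List.cons_append, lexLe, List.find?_cons]
    by_cases hxy : x = y
    · subst hxy
      simp [ih x]
    · have h1 : x ≠ y := hxy
      have h2 : decide (y ≠ x) = true := by simp; exact fun h => hxy h.symm
      rw [if_pos h1, h2]

def InvSt (dq : List String) (st : List String × List String × String × Nat × Option String) : Prop :=
  match st with
  | (left, right, c, run, d) =>
    left.reverse ++ right = dq ∧
    ((run = 0 ∧ dq = [] ∧ d = none) ∨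
     (0 < run ∧ ∃ rest, dq = List.replicate run c ++ rest ∧
        ((d = none ∧ rest = []) ∨ (∃ dv t, d = some dv ∧ rest = dv :: t ∧ dv ≠ c))))

theorem find?_replicate (x c : String) (hxc : x = c) : ∀ (run : Nat) (rest : List String),
    (List.replicate run c ++ rest).find? (fun y => decide (y ≠ x)) =
      rest.find? (fun y => decide (y ≠ x)) := by
  intro run
  induction run with
  | zero => intro rest; simp
  | succ m ih =>
    intro rest
    rw [List.replicate_succ, List.cons_append,
      List.find?_cons_of_neg (by simp [hxc])]
    exact ih rest

theorem decision (dq left right : List String) (c : String) (run : Nat) (d : Option String)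
    (x : String) (h : InvSt dq (left, right, c, run, d)) :
    prefer_front dq x =
      (if run = 0 then true
       else if x ≠ c then decide (x < c)
       else d.elim true (fun dv => decide (x < dv))) := by
  rw [prefer_front_eq_lexLe, lexLe_rotate]
  rcases h.2 with ⟨hr0, hdq, _⟩ | ⟨hpos, rest, hdq, hd⟩
  · subst hdq
    simp [hr0]
  · have hrun : run ≠ 0 := by omega
    rw [if_neg hrun]
    by_cases hxc : x = c
    · rw [if_neg (by simp [hxc])]
      rw [hdq, find?_replicate x c hxc]
      rcases hd with ⟨hdn, hrn⟩ | ⟨dv, t, hds, hrs, hdvc⟩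
      · subst hdn hrn; simp
      · subst hds hrs
        rw [List.find?_cons_of_pos (by simp [hxc]; exact fun hh => hdvc hh)]
        simp
    · rw [if_pos hxc]
      obtain ⟨m, rfl⟩ : ∃ m, run = m + 1 := ⟨run - 1, by omega⟩
      rw [hdq, List.replicate_succ, List.cons_append,
        List.find?_cons_of_pos (by simp; exact fun hh => hxc hh.symm)]

theorem step_preserves (dq : List String) (st : List String × List String × String × Nat × Option String)
    (x : String) (h : InvSt dq st) :
    InvSt (if prefer_front dq x then x :: dq else dq ++ [x]) (solveStep st x) := by
  obtain ⟨left, right, c, run, d⟩ := st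
  obtain ⟨h1, h2⟩ := h
  rw [decision dq left right c run d x ⟨h1, h2⟩]
  simp only [solveStep]
  rcases h2 with ⟨hr0, hdq, hdn⟩ | ⟨hpos, rest, hdq, hd⟩
  · subst hr0 hdq hdn
    obtain ⟨hl, hr⟩ := List.append_eq_nil_iff.mp h1
    have hle : left = [] := List.reverse_eq_nil_iff.mp hl
    subst hle hr
    simp only [if_true]
    by_cases hxc : x = c
    · rw [if_pos hxc]
      exact ⟨by simp, Or.inr ⟨Nat.one_pos, [], by simp [List.replicate, hxc], Or.inl ⟨rfl, rfl⟩⟩⟩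
    · rw [if_neg hxc, if_neg (by omega)]
      exact ⟨by simp, Or.inr ⟨Nat.one_pos, [], by simp [List.replicate], Or.inl ⟨rfl, rfl⟩⟩⟩
  · have hrun : run ≠ 0 := by omega
    by_cases hxc : x = c
    · have hxnc : ¬(x ≠ c) := by simp [hxc]
      rcases hd with ⟨hdn, hrn⟩ | ⟨dv, t, hds, hrs, hdvc⟩
      · -- deque is all c's; x = c goes to the front, run grows
        subst hdn hrn
        have hF : (if run = 0 then true
            else if x ≠ c then decide (x < c)
            else (none : Option String).elim true (fun dv => decide (x < dv))) = true := by
          rw [if_neg hrun, if_neg hxnc]; rfl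
        rw [hF, if_pos rfl, if_pos hxc]
        refine ⟨by simp [h1], Or.inr ⟨by omega, [], ?_, Or.inl ⟨rfl, rfl⟩⟩⟩
        rw [hdq, hxc, List.replicate_succ]
        simp
      · subst hds hrs
        by_cases hlt : x < dv
        · have hF : (if run = 0 then true
              else if x ≠ c then decide (x < c)
              else (some dv).elim true (fun dv => decide (x < dv))) = true := by
            rw [if_neg hrun, if_neg hxnc]; simpa using hlt
          rw [hF, if_pos rfl, if_pos hxc]
          refine ⟨by simp [h1], Or.inr ⟨by omega, dv :: t, ?_, Or.inr ⟨dv, t, rfl, rfl, hdvc⟩⟩⟩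
          rw [hdq, hxc, List.replicate_succ]
          simp
        · have hF : (if run = 0 then true
              else if x ≠ c then decide (x < c)
              else (some dv).elim true (fun dv => decide (x < dv))) = false := by
            rw [if_neg hrun, if_neg hxnc]; simpa using hlt
          rw [hF, if_neg Bool.false_ne_true, if_neg (by simp)]
          refine ⟨by rw [← List.append_assoc, h1], Or.inr ⟨hpos, dv :: (t ++ [x]),
            ?_, Or.inr ⟨dv, t ++ [x], rfl, rfl, hdvc⟩⟩⟩
          simp [hdq]
    · have hcx : ¬ c = x := fun hh => hxc hh.symm
      by_cases hlt : x < c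
      · have hF : (if run = 0 then true
            else if x ≠ c then decide (x < c)
            else d.elim true (fun dv => decide (x < dv))) = true := by
          rw [if_neg hrun, if_pos hxc]; simpa using hlt
        rw [hF, if_pos rfl, if_neg hxc, if_pos (by omega : run > 0)]
        obtain ⟨m, rfl⟩ : ∃ m, run = m + 1 := ⟨run - 1, by omega⟩
        refine ⟨by simp [h1], Or.inr ⟨Nat.one_pos, c :: (List.replicate m c ++ rest), ?_,
          Or.inr ⟨c, List.replicate m c ++ rest, rfl, rfl, hcx⟩⟩⟩
        rw [hdq, List.replicate_succ]
        simp [List.replicate]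
      · have hF : (if run = 0 then true
            else if x ≠ c then decide (x < c)
            else d.elim true (fun dv => decide (x < dv))) = false := by
          rw [if_neg hrun, if_pos hxc]; simpa using hlt
        rw [hF, if_neg Bool.false_ne_true]
        rcases hd with ⟨hdn, hrn⟩ | ⟨dv, t, hds, hrs, hdvc⟩
        · subst hdn hrn
          rw [if_pos rfl]
          refine ⟨by rw [← List.append_assoc, h1], Or.inr ⟨hpos, [x], ?_, Or.inr ⟨x, [], rfl, rfl, hxc⟩⟩⟩
          simp [hdq]
        · subst hds hrs
          rw [if_neg (by simp)]
          refine ⟨by rw [← List.append_assoc, h1], Or.inr ⟨hpos, dv :: (t ++ [x]), ?_,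
            Or.inr ⟨dv, t ++ [x], rfl, rfl, hdvc⟩⟩⟩
          simp [hdq]

theorem fold_preserves : ∀ (cards : List String) (dq : List String)
    (st : List String × List String × String × Nat × Option String),
    InvSt dq st →
    InvSt (cards.foldl (fun dq x => if prefer_front dq x then x :: dq else dq ++ [x]) dq)
      (cards.foldl solveStep st) := by
  intro cards
  induction cards with
  | nil => intro dq st h; simpa using h
  | cons y ys ih =>
    intro dq st h
    simp only [List.foldl_cons]
    exact ih _ _ (step_preserves dq st y h)

-- ===== VERDICT (by name: the statement is the Claim_ definition above) =====
theorem solve_one_spec : Claim_equal_solve_one := by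
  intro cards _
  unfold Spec_solve_one solve_one solve_one_alt
  have h := fold_preserves cards [] ([], [], "", 0, none) ⟨rfl, Or.inl ⟨rfl, rfl, rfl⟩⟩
  generalize hst : cards.foldl solveStep ([], [], "", 0, none) = st at h ⊢
  obtain ⟨left, right, c, run, d⟩ := st
  rw [← h.1]
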